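-- pv_equiv track=rewrite | github.com/paulsportsza-hub/bot | tests/qa_baseline_13.py | detect_sport
-- ===== SOURCE A (Python) =====
-- def detect_sport(text, league_hint=""):
--     t = (text + " " + league_hint).lower()
--     if any(w in t for w in ("cricket", "ipl", "sa20", "t20", "innings", "wicket")):
--         return "cricket"
--     if any(w in t for w in ("rugby", "urc", "super rugby", "six nations", "try ")):
--         return "rugby"
--     if any(w in t for w in ("ufc", "mma", "boxing", "bout", "knockout")):
--         return "combat"
--     if any(w in t for w in ("epl", "psl", "champions league", "premier league",
--                             "la liga", "serie a", "bundesliga", "ligue 1")):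
--         return "football"
--     return "unknown"
-- ===== SOURCE B (Python) =====
-- # Flat keyword->category scan with a min-priority accumulator (no early returns,
-- # no per-category grouping): every keyword is tested once and the best (lowest
-- # priority) matched category wins.
--
-- _KEYWORDS = (
--     ("cricket", "cricket"), ("ipl", "cricket"), ("sa20", "cricket"),
--     ("t20", "cricket"), ("innings", "cricket"), ("wicket", "cricket"),
--     ("rugby", "rugby"), ("urc", "rugby"), ("super rugby", "rugby"),
--     ("six nations", "rugby"), ("try ", "rugby"),
--     ("ufc", "combat"), ("mma", "combat"), ("boxing", "combat"),
--     ("bout", "combat"), ("knockout", "combat"),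
--     ("epl", "football"), ("psl", "football"), ("champions league", "football"),
--     ("premier league", "football"), ("la liga", "football"),
--     ("serie a", "football"), ("bundesliga", "football"), ("ligue 1", "football"),
-- )
--
-- _PRIORITY = {"cricket": 0, "rugby": 1, "combat": 2, "football": 3, "unknown": 4}
--
--
-- def detect_sport(text, league_hint=""):
--     t = (text + " " + league_hint).lower()
--     best = "unknown"
--     for kw, cat in _KEYWORDS:
--         if kw in t and _PRIORITY[cat] < _PRIORITY[best]:
--             best = cat
--     return best
-- ===== Notes on version B (the rewrite author's own statement) =====
-- stated objective: alternative
-- what changed: Replaces the ordered if/return chain over keyword groups by a single exhaustive pass over a flat keyword-to-category table that keeps the matched category of minimum priority in an accumulator (no short-circuiting, no grouping).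
import Mathlib
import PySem

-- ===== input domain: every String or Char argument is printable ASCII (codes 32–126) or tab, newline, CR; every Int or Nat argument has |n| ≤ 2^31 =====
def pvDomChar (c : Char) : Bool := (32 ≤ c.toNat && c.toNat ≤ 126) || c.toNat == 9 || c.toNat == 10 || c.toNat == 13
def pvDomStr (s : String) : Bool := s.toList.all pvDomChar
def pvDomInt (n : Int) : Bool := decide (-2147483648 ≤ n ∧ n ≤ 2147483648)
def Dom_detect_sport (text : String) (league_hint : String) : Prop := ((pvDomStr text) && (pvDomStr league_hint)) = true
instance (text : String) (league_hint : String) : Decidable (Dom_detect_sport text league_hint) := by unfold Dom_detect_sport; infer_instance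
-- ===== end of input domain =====

-- B replaces A's ordered if/return chain by one exhaustive pass over a flat keyword->category table keeping the matched category of minimum priority; objective: alternative.


-- ===== PORT A =====
def detect_sport (text : String) (league_hint : String) : String :=
  let t := PySem.Str.lower (text ++ " " ++ league_hint)
  if ["cricket", "ipl", "sa20", "t20", "innings", "wicket"].any (fun w => PySem.Str.isIn w t) then
    "cricket"
  else if ["rugby", "urc", "super rugby", "six nations", "try "].any (fun w => PySem.Str.isIn w t) then
    "rugby"
  else if ["ufc", "mma", "boxing", "bout", "knockout"].any (fun w => PySem.Str.isIn w t) then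
    "combat"
  else if ["epl", "psl", "champions league", "premier league",
           "la liga", "serie a", "bundesliga", "ligue 1"].any (fun w => PySem.Str.isIn w t) then
    "football"
  else
    "unknown"

-- ===== PORT B =====
def pvKeywords : List (String × String) :=
  [("cricket", "cricket"), ("ipl", "cricket"), ("sa20", "cricket"),
   ("t20", "cricket"), ("innings", "cricket"), ("wicket", "cricket"),
   ("rugby", "rugby"), ("urc", "rugby"), ("super rugby", "rugby"),
   ("six nations", "rugby"), ("try ", "rugby"),
   ("ufc", "combat"), ("mma", "combat"), ("boxing", "combat"),
   ("bout", "combat"), ("knockout", "combat"),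
   ("epl", "football"), ("psl", "football"), ("champions league", "football"),
   ("premier league", "football"), ("la liga", "football"),
   ("serie a", "football"), ("bundesliga", "football"), ("ligue 1", "football")]

def pvPriority : PySem.Dict String Int :=
  PySem.Dict.ofList [("cricket", 0), ("rugby", 1), ("combat", 2), ("football", 3), ("unknown", 4)]

-- _PRIORITY[cat]: the lookup is only ever applied to keys present in the dict, so the default is unreachable
def pvPrio (c : String) : Int := PySem.Dict.getD pvPriority c 99

def detect_sport_alt (text : String) (league_hint : String) : String :=
  let t := PySem.Str.lower (text ++ " " ++ league_hint)
  pvKeywords.foldl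
    (fun best p => if PySem.Str.isIn p.1 t && decide (pvPrio p.2 < pvPrio best) then p.2 else best)
    "unknown"

-- ===== PRECONDITION & SPEC =====
def Spec_detect_sport (text : String) (league_hint : String) (out : String) : Prop := out = detect_sport_alt text league_hint
instance (text : String) (league_hint : String) (out : String) : Decidable (Spec_detect_sport text league_hint out) := by unfold Spec_detect_sport; infer_instance

-- ===== CLAIM =====
def Claim_equal_detect_sport : Prop := ∀ (text : String) (league_hint : String), Dom_detect_sport text league_hint → Spec_detect_sport text league_hint (detect_sport text league_hint)

-- ===== LEMMAS AND PROOFS =====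

-- folding B's accumulator over one group (all keywords mapped to the same category)
theorem pv_fold_group (t cat : String) (ws : List String) (best : String) :
    (ws.map (fun w => (w, cat))).foldl
        (fun best p => if PySem.Str.isIn p.1 t && decide (pvPrio p.2 < pvPrio best) then p.2 else best)
        best
      = if ws.any (fun w => PySem.Str.isIn w t) then
          (if pvPrio cat < pvPrio best then cat else best)
        else best := by
  induction ws generalizing best with
  | nil => simp
  | cons w ws ih =>
    simp only [List.map_cons, List.foldl_cons, List.any_cons]
    by_cases h1 : PySem.Str.isIn w t = true
    · have htrue : (PySem.Str.isIn w t || ws.any fun w => PySem.Str.isIn w t) = true := by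
        rw [h1]; exact Bool.true_or _
      by_cases h2 : pvPrio cat < pvPrio best
      · rw [if_pos (by rw [h1, Bool.true_and, decide_eq_true_eq]; exact h2), ih,
          if_neg (lt_irrefl (pvPrio cat)), ite_self, if_pos htrue, if_pos h2]
      · rw [if_neg (by rw [h1, Bool.true_and, decide_eq_true_eq]; exact h2), ih,
          if_neg h2, ite_self, ite_self]
    · have hb : PySem.Str.isIn w t = false := by simpa using h1
      rw [if_neg (by rw [hb, Bool.false_and]; exact Bool.false_ne_true), ih]
      simp only [hb, Bool.false_or]

theorem pv_keywords_split : pvKeywords =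
    (["cricket", "ipl", "sa20", "t20", "innings", "wicket"].map (fun w => (w, "cricket"))) ++
    (["rugby", "urc", "super rugby", "six nations", "try "].map (fun w => (w, "rugby"))) ++
    (["ufc", "mma", "boxing", "bout", "knockout"].map (fun w => (w, "combat"))) ++
    (["epl", "psl", "champions league", "premier league",
      "la liga", "serie a", "bundesliga", "ligue 1"].map (fun w => (w, "football"))) := rfl

-- the five priority values (evaluated once, cited in the verdict)
theorem pv_prio_cricket : pvPrio "cricket" = 0 := rfl
theorem pv_prio_rugby : pvPrio "rugby" = 1 := rfl
theorem pv_prio_combat : pvPrio "combat" = 2 := rfl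
theorem pv_prio_football : pvPrio "football" = 3 := rfl
theorem pv_prio_unknown : pvPrio "unknown" = 4 := rfl

-- ===== VERDICT =====
theorem detect_sport_spec : Claim_equal_detect_sport := by
  intro text league_hint _
  unfold Spec_detect_sport detect_sport detect_sport_alt
  rw [pv_keywords_split]
  simp only [List.foldl_append, pv_fold_group]
  cases h1 : ["cricket", "ipl", "sa20", "t20", "innings", "wicket"].any
      (fun w => PySem.Str.isIn w (PySem.Str.lower (text ++ " " ++ league_hint))) <;>
  cases h2 : ["rugby", "urc", "super rugby", "six nations", "try "].any
      (fun w => PySem.Str.isIn w (PySem.Str.lower (text ++ " " ++ league_hint))) <;>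
  cases h3 : ["ufc", "mma", "boxing", "bout", "knockout"].any
      (fun w => PySem.Str.isIn w (PySem.Str.lower (text ++ " " ++ league_hint))) <;>
  cases h4 : ["epl", "psl", "champions league", "premier league",
              "la liga", "serie a", "bundesliga", "ligue 1"].any
      (fun w => PySem.Str.isIn w (PySem.Str.lower (text ++ " " ++ league_hint))) <;>
  simp only [h1, h2, h3, h4, if_true, if_false, Bool.false_eq_true, pv_prio_cricket,
    pv_prio_rugby, pv_prio_combat, pv_prio_football, pv_prio_unknown] <;> norm_num [pv_prio_cricket, pv_prio_rugby, pv_prio_combat, pv_prio_football, pv_prio_unknown]
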